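-- pv_equiv track=rewrite | github.com/wabka22/wave-segmentation | utils/metrics.py | mask_to_segments
-- ===== SOURCE A (Python) =====
-- def mask_to_segments(mask, cls):
--     segments = []
--     in_seg = False
--     start = 0
--
--     for i in range(len(mask)):
--         if mask[i] == cls and not in_seg:
--             start = i
--             in_seg = True
--         elif mask[i] != cls and in_seg:
--             segments.append((start, i))
--             in_seg = False
--
--     if in_seg:
--         segments.append((start, len(mask)))
--
--     return segments
-- ===== SOURCE B (Python) =====
-- def mask_to_segments(mask, cls):
--     segments = []
--     n = len(mask)
--     pos = 0
--     while pos < n: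
--         match = mask[pos] == cls
--         end = pos + 1
--         while end < n and (mask[end] == cls) == match:
--             end += 1
--         if match:
--             segments.append((pos, end))
--         pos = end
--     return segments
-- ===== Notes on version B (the rewrite author's own statement) =====
-- stated objective: alternative
-- what changed: B partitions the mask into maximal runs of equal (== cls) value with an inner scan that finds each run's end, appending one segment per matching run, instead of A's per-element in_seg flag automaton.
import Mathlib
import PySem

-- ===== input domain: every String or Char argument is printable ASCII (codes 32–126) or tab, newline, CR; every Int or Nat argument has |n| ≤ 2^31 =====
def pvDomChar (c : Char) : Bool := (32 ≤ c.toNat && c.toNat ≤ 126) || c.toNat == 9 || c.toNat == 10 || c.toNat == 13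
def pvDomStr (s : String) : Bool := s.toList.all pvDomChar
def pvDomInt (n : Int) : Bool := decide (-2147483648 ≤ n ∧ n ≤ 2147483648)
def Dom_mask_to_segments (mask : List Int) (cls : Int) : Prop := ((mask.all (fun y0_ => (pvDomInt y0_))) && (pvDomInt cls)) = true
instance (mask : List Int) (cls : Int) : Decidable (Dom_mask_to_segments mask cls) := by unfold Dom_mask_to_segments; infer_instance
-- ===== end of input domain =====

-- B partitions the mask into maximal runs of equal (== cls) value (inner scan per run)
-- instead of A's per-element in_seg flag automaton; same O(n) cost, alternative structure.

-- ===== PORT A =====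
-- A's for-loop over i in range(len(mask)) carrying (segments, in_seg, start) and i;
-- the trailing 'if in_seg' append uses i, which equals len(mask) when the loop ends.
def pvALoop (cls : Int) : List Int → List (Int × Int) → Bool → Int → Int → List (Int × Int)
  | [], segs, in_seg, start, i => if in_seg then segs ++ [(start, i)] else segs
  | x :: rest, segs, in_seg, start, i =>
    if x == cls && !in_seg then pvALoop cls rest segs true i (i + 1)
    else if x != cls && in_seg then pvALoop cls rest (segs ++ [(start, i)]) false start (i + 1)
    else pvALoop cls rest segs in_seg start (i + 1)

def mask_to_segments (mask : List Int) (cls : Int) : List (Int × Int) :=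
  pvALoop cls mask [] false 0 0

-- ===== PORT B =====
-- B's outer while on pos: x is mask[pos], match := x == cls, the inner while scans from
-- pos+1 for the t further elements with the same (== cls) value, end = pos + 1 + t;
-- one segment per matching run, then pos jumps to end (here: recurse on the rest).
def pvBGo (cls : Int) : List Int → Int → List (Int × Int)
  | [], _ => []
  | x :: rest, pos =>
    let m := x == cls
    let t := (rest.takeWhile (fun y => (y == cls) == m)).length
    let k : Int := 1 + (t : Int)
    (if m then [(pos, pos + k)] else []) ++ pvBGo cls (rest.drop t) (pos + k)
termination_by l _ => l.length
decreasing_by simp [List.length_drop]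


def mask_to_segments_alt (mask : List Int) (cls : Int) : List (Int × Int) :=
  pvBGo cls mask 0

-- ===== PRECONDITION & SPEC =====
def Spec_mask_to_segments (mask : List Int) (cls : Int) (out : List (Int × Int)) : Prop := out = mask_to_segments_alt mask cls
instance (mask : List Int) (cls : Int) (out : List (Int × Int)) : Decidable (Spec_mask_to_segments mask cls out) := by unfold Spec_mask_to_segments; infer_instance

-- ===== CLAIM (what is proved, stated in full; the proofs are below) =====
def Claim_equal_mask_to_segments : Prop := ∀ (mask : List Int) (cls : Int), Dom_mask_to_segments mask cls → Spec_mask_to_segments mask cls (mask_to_segments mask cls)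

-- ===== LEMMAS AND PROOFS =====

-- B's result when a segment is open since s with current position i (proof-side helper)
def pvOpen (cls : Int) : List Int → Int → Int → List (Int × Int)
  | [], s, i => [(s, i)]
  | x :: r, s, i =>
    if x == cls then pvOpen cls r s (i + 1) else (s, i) :: pvBGo cls r (i + 1)


theorem pvBGo_nil (cls i : Int) : pvBGo cls [] i = [] := by rw [pvBGo.eq_def]

theorem pvBGo_cons (cls x : Int) (rest : List Int) (pos : Int) :
    pvBGo cls (x :: rest) pos =
      (if x == cls then [(pos, pos + (1 + ((rest.takeWhile (fun y => (y == cls) == (x == cls))).length : Int)))] else []) ++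
        pvBGo cls (rest.drop (rest.takeWhile (fun y => (y == cls) == (x == cls))).length)
          (pos + (1 + ((rest.takeWhile (fun y => (y == cls) == (x == cls))).length : Int))) := by
  rw [pvBGo.eq_def]

theorem pvBGo_skip (cls x : Int) (l : List Int) (i : Int) (hx : x ≠ cls) :
    pvBGo cls (x :: l) i = pvBGo cls l (i + 1) := by
  have hb : (x == cls) = false := by simp [hx]
  cases l with
  | nil => simp [pvBGo_cons, pvBGo_nil, hb]
  | cons y r =>
    by_cases hy : y = cls
    · have hyb : (y == cls) = true := by simp [hy]
      simp [pvBGo_cons, hb, hyb]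
    · have hyb : (y == cls) = false := by simp [hy]
      simp [pvBGo_cons, hb, hyb]
      congr 1
      ring

theorem pvOpen_eq (cls : Int) (l : List Int) (s i : Int) :
    pvOpen cls l s i =
      (s, i + ((l.takeWhile (fun y => y == cls)).length : Int)) ::
        pvBGo cls (l.drop (l.takeWhile (fun y => y == cls)).length)
          (i + ((l.takeWhile (fun y => y == cls)).length : Int)) := by
  induction l generalizing i with
  | nil => simp [pvOpen, pvBGo_nil]
  | cons x r ih =>
    by_cases hx : x = cls
    · have hb : (x == cls) = true := by simp [hx]
      rw [pvOpen, if_pos hb, ih (i + 1)]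
      simp [hb]
      exact ⟨by ring, by congr 1; ring⟩
    · have hb : (x == cls) = false := by simp [hx]
      rw [pvOpen, if_neg (by simp [hb])]
      simp [hb, pvBGo_skip cls x r i hx]

theorem pvBGo_open (cls x : Int) (l : List Int) (i : Int) (hx : x = cls) :
    pvBGo cls (x :: l) i = pvOpen cls l i (i + 1) := by
  have hb : (x == cls) = true := by simp [hx]
  rw [pvOpen_eq, pvBGo_cons]
  have he : (fun y => (y == cls) == (x == cls)) = fun y => y == cls := by
    funext y; simp [hb]
  rw [he]
  simp [hb]
  exact ⟨by ring, by congr 1; ring⟩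

theorem pvALoop_eq (cls : Int) (l : List Int) :
    ∀ (segs : List (Int × Int)) (s i : Int),
      pvALoop cls l segs false s i = segs ++ pvBGo cls l i ∧
      pvALoop cls l segs true s i = segs ++ pvOpen cls l s i := by
  induction l with
  | nil => intro segs s i; simp [pvALoop, pvBGo_nil, pvOpen]
  | cons x r ih =>
    intro segs s i
    by_cases hx : x = cls
    · have hb : (x == cls) = true := by simp [hx]
      have hne : (x != cls) = false := by simp [bne, hb]
      constructor
      · rw [pvALoop, if_pos (by simp [hb]), (ih segs i (i + 1)).2,
          pvBGo_open cls x r i hx]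
      · rw [pvALoop, if_neg (by simp [hb]), if_neg (by simp [hne]),
          (ih segs s (i + 1)).2, pvOpen, if_pos hb]
    · have hb : (x == cls) = false := by simp [hx]
      have hne : (x != cls) = true := by simp [bne, hb]
      constructor
      · rw [pvALoop, if_neg (by simp [hb]), if_neg (by simp [hne]),
          (ih segs s (i + 1)).1, pvBGo_skip cls x r i hx]
      · rw [pvALoop, if_neg (by simp [hb]), if_pos (by simp [hne]),
          (ih (segs ++ [(s, i)]) s (i + 1)).1, pvOpen, if_neg (by simp [hb])]
        simp

-- ===== VERDICT (by name: the statement is the Claim_ definition above) =====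
theorem mask_to_segments_spec : Claim_equal_mask_to_segments := by
  intro mask cls _
  unfold Spec_mask_to_segments mask_to_segments mask_to_segments_alt
  exact (pvALoop_eq cls mask [] 0 0).1.trans (by simp)
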